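-- pv_equiv track=rewrite | github.com/AnirudhRaghavan11/CS470NPHard | hcp.py | hamiltonian_to_tsp
-- ===== SOURCE A (Python) =====
-- def hamiltonian_to_tsp(num_nodes, edges):
--     tsp_values = []
--
--     for i in range(1, num_nodes):
--         for j in range(i + 1, num_nodes + 1):
--             if (i, j) in edges or (j, i) in edges:
--                 weight = 1
--             else:
--                 weight = num_nodes + 1  # Assign a large weight to non-existing edges
--             tsp_values.append((i, j, weight))
--
--     return tsp_values
-- ===== SOURCE B (Python) =====
-- def hamiltonian_to_tsp(num_nodes, edges):
--     n = num_nodes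
--     # collect the normalized in-range edge pairs (lo, hi), deduplicated
--     pairs = set()
--     for a, b in edges:
--         lo, hi = (a, b) if a < b else (b, a)
--         if 1 <= lo and lo < hi and hi <= n:
--             pairs.add((lo, hi))
--     # sort them; key is injective and lexicographic on in-range pairs
--     marks = sorted(pairs, key=lambda p: p[0] * n + p[1])
--     # single merge pass: pairs are generated in strictly increasing lex order,
--     # so one pointer into marks decides membership without any inner scan
--     out = []
--     k = 0
--     m = len(marks)
--     for i in range(1, n):
--         for j in range(i + 1, n + 1):
--             while k < m and (marks[k][0] < i or (marks[k][0] == i and marks[k][1] < j)):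
--                 k += 1
--             if k < m and marks[k] == (i, j):
--                 out.append((i, j, 1))
--                 k += 1
--             else:
--                 out.append((i, j, n + 1))
--     return out
-- ===== Notes on version B (the rewrite author's own statement) =====
-- stated objective: alternative
-- what changed: A membership-tests the whole edge list twice for every (i,j) pair; B instead normalizes, dedups and sorts the in-range edges once and then decides every weight in a single merge pass with one pointer walking the sorted edge list alongside the lexicographically increasing pair stream (sort-then-merge / two pointers instead of nested scans).
import Mathlib
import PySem

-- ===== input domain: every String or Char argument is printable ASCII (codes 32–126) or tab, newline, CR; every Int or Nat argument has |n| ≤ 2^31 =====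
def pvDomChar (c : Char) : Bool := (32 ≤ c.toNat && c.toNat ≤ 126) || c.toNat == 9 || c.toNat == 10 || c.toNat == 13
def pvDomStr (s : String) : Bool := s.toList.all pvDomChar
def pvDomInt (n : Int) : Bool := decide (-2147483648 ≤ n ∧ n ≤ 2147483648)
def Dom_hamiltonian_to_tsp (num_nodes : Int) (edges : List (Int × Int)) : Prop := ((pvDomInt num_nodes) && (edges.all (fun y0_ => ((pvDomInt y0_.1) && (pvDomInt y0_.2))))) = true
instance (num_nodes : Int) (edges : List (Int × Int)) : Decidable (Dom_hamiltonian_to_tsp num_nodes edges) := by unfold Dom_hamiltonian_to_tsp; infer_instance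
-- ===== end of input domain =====

-- B replaces A's per-pair double scan of the edge list by sort-then-merge: the
-- normalized in-range edges are deduplicated and sorted once, and a single
-- pointer merged against the lexicographically increasing pair stream decides
-- each weight without any inner scan (objective: alternative).

-- ===== PORT A =====
def hamiltonian_to_tsp (num_nodes : Int) (edges : List (Int × Int)) : List (Int × Int × Int) :=
  (PySem.List.pyRange 1 num_nodes 1).foldl (fun acc i =>
    (PySem.List.pyRange (i + 1) (num_nodes + 1) 1).foldl (fun acc j =>
      acc ++ [(i, j, if (i, j) ∈ edges ∨ (j, i) ∈ edges then (1 : Int) else num_nodes + 1)]) acc) []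

-- ===== PORT B =====
-- the edge-collection fold of Source B building the deduplicated set 'pairs'
def pvPairs (n : Int) (edges : List (Int × Int)) : PySem.Set (Int × Int) :=
  edges.foldl (fun s e =>
    let lo := if e.1 < e.2 then e.1 else e.2
    let hi := if e.1 < e.2 then e.2 else e.1
    if 1 ≤ lo ∧ lo < hi ∧ hi ≤ n then PySem.Set.add s (lo, hi) else s) []

-- Source B's 'marks = sorted(pairs, key=lambda p: p[0] * n + p[1])'
def pvMarks (n : Int) (edges : List (Int × Int)) : List (Int × Int) :=
  PySem.List.sorted (pvPairs n edges) (fun p => p.1 * n + p.2) false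

-- the 'while k < m and (marks[k][0] < i or ...)' loop of Source B
def pvAdvance (marks : List (Int × Int)) (i j : Int) (k : Nat) : Nat :=
  if h : k < marks.length then
    if marks[k].1 < i ∨ (marks[k].1 = i ∧ marks[k].2 < j) then
      pvAdvance marks i j (k + 1)
    else k
  else k
termination_by marks.length - k

def hamiltonian_to_tsp_alt (num_nodes : Int) (edges : List (Int × Int)) : List (Int × Int × Int) :=
  let marks := pvMarks num_nodes edges
  ((PySem.List.pyRange 1 num_nodes 1).foldl (fun st i =>
    (PySem.List.pyRange (i + 1) (num_nodes + 1) 1).foldl (fun st j =>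
      let k := pvAdvance marks i j st.2
      if k < marks.length ∧ marks[k]? = some (i, j) then (st.1 ++ [(i, j, (1 : Int))], k + 1)
      else (st.1 ++ [(i, j, num_nodes + 1)], k)) st)
    (([], 0) : List (Int × Int × Int) × Nat)).1

-- ===== PRECONDITION & SPEC =====
def Spec_hamiltonian_to_tsp (num_nodes : Int) (edges : List (Int × Int)) (out : List (Int × Int × Int)) : Prop := out = hamiltonian_to_tsp_alt num_nodes edges
instance (num_nodes : Int) (edges : List (Int × Int)) (out : List (Int × Int × Int)) : Decidable (Spec_hamiltonian_to_tsp num_nodes edges out) := by unfold Spec_hamiltonian_to_tsp; infer_instance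

-- ===== CLAIM (what is proved, stated in full; the proofs are below) =====
def Claim_equal_hamiltonian_to_tsp : Prop := ∀ (num_nodes : Int) (edges : List (Int × Int)), Dom_hamiltonian_to_tsp num_nodes edges → Spec_hamiltonian_to_tsp num_nodes edges (hamiltonian_to_tsp num_nodes edges)

-- ===== LEMMAS AND PROOFS =====

-- Python's lexicographic '<' on the pairs involved
def pvLt (p q : Int × Int) : Prop := p.1 < q.1 ∨ (p.1 = q.1 ∧ p.2 < q.2)

theorem pvLt_trans {p q r : Int × Int} (h1 : pvLt p q) (h2 : pvLt q r) : pvLt p r := by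
  unfold pvLt at *; omega

theorem pvPairs_go_mem (n : Int) (edges : List (Int × Int)) :
    ∀ (s : PySem.Set (Int × Int)) (p : Int × Int),
      p ∈ edges.foldl (fun s e =>
        let lo := if e.1 < e.2 then e.1 else e.2
        let hi := if e.1 < e.2 then e.2 else e.1
        if 1 ≤ lo ∧ lo < hi ∧ hi ≤ n then PySem.Set.add s (lo, hi) else s) s ↔
      p ∈ s ∨ (1 ≤ p.1 ∧ p.1 < p.2 ∧ p.2 ≤ n ∧ (p ∈ edges ∨ (p.2, p.1) ∈ edges)) := by
  induction edges with
  | nil => intro s p; simp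
  | cons e es ih =>
    intro s p
    rw [List.foldl_cons, ih]
    have hstep : ∀ s' : PySem.Set (Int × Int),
        (p ∈ (let lo := if e.1 < e.2 then e.1 else e.2
              let hi := if e.1 < e.2 then e.2 else e.1
              if 1 ≤ lo ∧ lo < hi ∧ hi ≤ n then PySem.Set.add s' (lo, hi) else s')) ↔
        p ∈ s' ∨ (1 ≤ p.1 ∧ p.1 < p.2 ∧ p.2 ≤ n ∧ (p = e ∨ (p.2, p.1) = e)) := by
      intro s'
      simp only []
      by_cases hlt : e.1 < e.2
      · simp only [if_pos hlt]
        by_cases hc : 1 ≤ e.1 ∧ e.1 < e.2 ∧ e.2 ≤ n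
        · rw [if_pos hc, PySem.Set.mem_add]
          constructor
          · rintro (h | rfl)
            · exact Or.inl h
            · exact Or.inr ⟨hc.1, hc.2.1, hc.2.2, Or.inl rfl⟩
          · rintro (h | ⟨h1, h2, h3, (rfl | heq)⟩)
            · exact Or.inl h
            · exact Or.inr rfl
            · exfalso
              have h1' := congrArg Prod.fst heq
              have h2' := congrArg Prod.snd heq
              simp only [] at h1' h2'
              omega
        · rw [if_neg hc]
          constructor
          · exact Or.inl
          · rintro (h | ⟨h1, h2, h3, (rfl | heq)⟩)
            · exact h
            · exact absurd ⟨h1, h2, h3⟩ hc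
            · exfalso
              have h1' := congrArg Prod.fst heq
              have h2' := congrArg Prod.snd heq
              simp only [] at h1' h2'
              omega
      · simp only [if_neg hlt]
        by_cases hc : 1 ≤ e.2 ∧ e.2 < e.1 ∧ e.1 ≤ n
        · rw [if_pos hc, PySem.Set.mem_add]
          constructor
          · rintro (h | rfl)
            · exact Or.inl h
            · exact Or.inr ⟨hc.1, hc.2.1, hc.2.2, Or.inr rfl⟩
          · rintro (h | ⟨h1, h2, h3, (rfl | heq)⟩)
            · exact Or.inl h
            · exfalso; omega
            · exact Or.inr (Prod.ext_iff.mpr ⟨congrArg Prod.snd heq, congrArg Prod.fst heq⟩)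
        · rw [if_neg hc]
          constructor
          · exact Or.inl
          · rintro (h | ⟨h1, h2, h3, (rfl | heq)⟩)
            · exact h
            · exfalso; omega
            · exfalso
              have h1' := congrArg Prod.fst heq
              have h2' := congrArg Prod.snd heq
              simp only [] at h1' h2'
              omega
    rw [hstep s]
    constructor
    · rintro ((h | h) | h)
      · exact Or.inl h
      · exact Or.inr ⟨h.1, h.2.1, h.2.2.1, h.2.2.2.elim (fun he => Or.inl (he ▸ List.mem_cons_self)) (fun he => Or.inr (he ▸ List.mem_cons_self))⟩
      · exact Or.inr ⟨h.1, h.2.1, h.2.2.1, h.2.2.2.elim (fun hm => Or.inl (List.mem_cons_of_mem _ hm)) (fun hm => Or.inr (List.mem_cons_of_mem _ hm))⟩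
    · rintro (h | ⟨h1, h2, h3, (hm | hm)⟩)
      · exact Or.inl (Or.inl h)
      · rcases List.mem_cons.mp hm with rfl | hm'
        · exact Or.inl (Or.inr ⟨h1, h2, h3, Or.inl rfl⟩)
        · exact Or.inr ⟨h1, h2, h3, Or.inl hm'⟩
      · rcases List.mem_cons.mp hm with heq | hm'
        · exact Or.inl (Or.inr ⟨h1, h2, h3, Or.inr heq⟩)
        · exact Or.inr ⟨h1, h2, h3, Or.inr hm'⟩

theorem pvPairs_mem (n : Int) (edges : List (Int × Int)) (p : Int × Int) :
    p ∈ pvPairs n edges ↔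
      1 ≤ p.1 ∧ p.1 < p.2 ∧ p.2 ≤ n ∧ (p ∈ edges ∨ (p.2, p.1) ∈ edges) := by
  unfold pvPairs
  rw [pvPairs_go_mem n edges [] p]
  simp

theorem pvPairs_nodup (n : Int) (edges : List (Int × Int)) : (pvPairs n edges).Nodup := by
  unfold pvPairs
  suffices h : ∀ s : PySem.Set (Int × Int), s.Nodup →
      (edges.foldl (fun s e =>
        let lo := if e.1 < e.2 then e.1 else e.2
        let hi := if e.1 < e.2 then e.2 else e.1
        if 1 ≤ lo ∧ lo < hi ∧ hi ≤ n then PySem.Set.add s (lo, hi) else s) s).Nodup from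
    h [] List.nodup_nil
  induction edges with
  | nil => intro s hs; exact hs
  | cons e es ih =>
    intro s hs
    rw [List.foldl_cons]
    apply ih
    by_cases he : e.1 < e.2
    · simp only [if_pos he]
      split
      · exact PySem.Set.nodup_add _ _ hs
      · exact hs
    · simp only [if_neg he]
      split
      · exact PySem.Set.nodup_add _ _ hs
      · exact hs

theorem pvMarks_mem (n : Int) (edges : List (Int × Int)) (p : Int × Int) :
    p ∈ pvMarks n edges ↔
      1 ≤ p.1 ∧ p.1 < p.2 ∧ p.2 ≤ n ∧ (p ∈ edges ∨ (p.2, p.1) ∈ edges) := by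
  unfold pvMarks
  rw [PySem.List.mem_sorted, pvPairs_mem]

-- the sort key is strictly monotone along pvLt on in-range pairs
theorem pvKey_lt (n : Int) {a b : Int × Int}
    (ha : 1 ≤ a.1 ∧ a.1 < a.2 ∧ a.2 ≤ n) (hb : 1 ≤ b.1 ∧ b.1 < b.2 ∧ b.2 ≤ n)
    (h : pvLt a b) : a.1 * n + a.2 < b.1 * n + b.2 := by
  rcases h with h | ⟨h1, h2⟩
  · have hn : (1 : Int) * n ≤ (b.1 - a.1) * n :=
      mul_le_mul_of_nonneg_right (by omega) (by omega)
    nlinarith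
  · nlinarith

theorem pvMarks_pairwise (n : Int) (edges : List (Int × Int)) :
    (pvMarks n edges).Pairwise pvLt := by
  have hperm := PySem.List.sorted_perm (pvPairs n edges) (fun p : Int × Int => p.1 * n + p.2) false
  have hnd : (pvMarks n edges).Nodup := hperm.nodup_iff.mpr (pvPairs_nodup n edges)
  have hle : (pvMarks n edges).Pairwise
      (fun a b : Int × Int => a.1 * n + a.2 ≤ b.1 * n + b.2) :=
    PySem.List.sorted_pairwise _ _
  have hboth := hle.and hnd
  refine hboth.imp_of_mem ?_
  intro a b hma hmb ⟨hab, hne⟩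
  have ha := (pvMarks_mem n edges a).mp hma
  have hb := (pvMarks_mem n edges b).mp hmb
  by_contra hnlt
  have : pvLt b a ∨ a = b := by
    unfold pvLt at *
    rcases lt_trichotomy a.1 b.1 with h | h | h
    · exact absurd (Or.inl h) hnlt
    · rcases lt_trichotomy a.2 b.2 with h2 | h2 | h2
      · exact absurd (Or.inr ⟨h, h2⟩) hnlt
      · exact Or.inr (Prod.ext h h2)
      · exact Or.inl (Or.inr ⟨h.symm, h2⟩)
    · exact Or.inl (Or.inl h)
  rcases this with h | rfl
  · have := pvKey_lt n ⟨hb.1, hb.2.1, hb.2.2.1⟩ ⟨ha.1, ha.2.1, ha.2.2.1⟩ h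
    omega
  · exact hne rfl

-- pvAdvance: bounds, everything skipped was smaller, the stop point is not smaller
theorem pvAdvance_spec (marks : List (Int × Int)) (i j : Int) :
    ∀ k, k ≤ marks.length →
      k ≤ pvAdvance marks i j k ∧ pvAdvance marks i j k ≤ marks.length ∧
      (∀ t (ht : t < marks.length), k ≤ t → t < pvAdvance marks i j k →
        pvLt marks[t] (i, j)) ∧
      (∀ h : pvAdvance marks i j k < marks.length,
        ¬ pvLt (marks[pvAdvance marks i j k]'h) (i, j)) := by
  intro k
  induction k using pvAdvance.induct marks i j with
  | case1 k hk hcond ih =>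
    intro _
    rw [pvAdvance, dif_pos hk, if_pos hcond]
    obtain ⟨ih1, ih2, ih3, ih4⟩ := ih (by omega)
    refine ⟨by omega, ih2, ?_, ih4⟩
    intro t ht hkt htadv
    by_cases hteq : t = k
    · subst hteq; exact hcond
    · exact ih3 t ht (by omega) htadv
  | case2 k hk hcond =>
    intro _
    rw [pvAdvance, dif_pos hk, if_neg hcond]
    exact ⟨le_refl k, by omega, fun t ht h1 h2 => absurd h2 (by omega), fun _ => hcond⟩
  | case3 k hk =>
    intro hkle
    rw [pvAdvance, dif_neg hk]
    exact ⟨le_refl k, hkle, fun t ht h1 h2 => absurd h2 (by omega), fun h => absurd h hk⟩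

-- after advancing, the pointer hits p exactly when p is in the sorted marks
theorem pvMatch_iff (marks : List (Int × Int)) (p : Int × Int) (k' : Nat)
    (hpw : marks.Pairwise pvLt)
    (hall : ∀ t (ht : t < marks.length), t < k' → pvLt marks[t] p)
    (hstop : ∀ h : k' < marks.length, ¬ pvLt (marks[k']'h) p) :
    (k' < marks.length ∧ marks[k']? = some p) ↔ p ∈ marks := by
  constructor
  · rintro ⟨hlt, hsome⟩
    exact List.mem_of_getElem? hsome
  · intro hmem
    obtain ⟨t, ht, rfl⟩ := List.mem_iff_getElem.mp hmem
    rcases lt_trichotomy t k' with h | rfl | h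
    · exact absurd (hall t ht h) (by unfold pvLt; omega)
    · exact ⟨ht, List.getElem?_eq_getElem ht⟩
    · exfalso
      have hk' : k' < marks.length := lt_trans h ht
      exact hstop hk' (List.pairwise_iff_getElem.mp hpw k' t hk' ht h)

-- one fused merge step of Source B's inner loop body, on a pair p
def pvStep (n : Int) (marks : List (Int × Int))
    (st : List (Int × Int × Int) × Nat) (p : Int × Int) : List (Int × Int × Int) × Nat :=
  let k := pvAdvance marks p.1 p.2 st.2
  if k < marks.length ∧ marks[k]? = some (p.1, p.2) then (st.1 ++ [(p.1, p.2, (1 : Int))], k + 1)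
  else (st.1 ++ [(p.1, p.2, n + 1)], k)

-- the merge invariant: every consumed mark is below every remaining pair
theorem pvMerge_go (n : Int) (marks : List (Int × Int)) (hpw : marks.Pairwise pvLt) :
    ∀ (ps : List (Int × Int)) (out : List (Int × Int × Int)) (k : Nat),
      k ≤ marks.length →
      (∀ t (ht : t < marks.length), t < k → ∀ p ∈ ps, pvLt marks[t] p) →
      ps.Pairwise pvLt →
      (ps.foldl (pvStep n marks) (out, k)).1 =
        out ++ ps.map (fun p => (p.1, p.2, if p ∈ marks then (1 : Int) else n + 1)) := by
  intro ps
  induction ps with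
  | nil => intro out k _ _ _; simp
  | cons p ps ih =>
    intro out k hk hinv hpwps
    obtain ⟨hhead, htail⟩ := List.pairwise_cons.mp hpwps
    obtain ⟨hk1, hk2, hk3, hk4⟩ := pvAdvance_spec marks p.1 p.2 k hk
    set k' := pvAdvance marks p.1 p.2 k with hk'
    have hall : ∀ t (ht : t < marks.length), t < k' → pvLt marks[t] p := by
      intro t ht htk'
      by_cases h : t < k
      · exact hinv t ht h p List.mem_cons_self
      · exact hk3 t ht (by omega) htk'
    have hmatch := pvMatch_iff marks p k' hpw hall hk4
    rw [List.foldl_cons]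
    by_cases hm : p ∈ marks
    · have hk'lt : k' < marks.length := (hmatch.mpr hm).1
      have hpk' : marks[k'] = p := by
        have := (hmatch.mpr hm).2
        rw [List.getElem?_eq_getElem hk'lt] at this
        exact Option.some.inj this
      have hstep : pvStep n marks (out, k) p = (out ++ [(p.1, p.2, 1)], k' + 1) := by
        unfold pvStep
        simp only []
        rw [if_pos (by rw [show (p.1, p.2) = p from rfl]; exact hmatch.mpr hm)]
      rw [hstep, ih (out ++ [(p.1, p.2, 1)]) (k' + 1) (by omega) ?_ htail]
      · rw [List.map_cons, if_pos hm]; simp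
      · intro t ht htk q hq
        by_cases hteq : t = k'
        · subst hteq; rw [hpk']; exact hhead q hq
        · exact pvLt_trans (hall t ht (by omega)) (hhead q hq)
    · have hstep : pvStep n marks (out, k) p = (out ++ [(p.1, p.2, n + 1)], k') := by
        unfold pvStep
        simp only []
        rw [if_neg (by rw [show (p.1, p.2) = p from rfl]; intro hc; exact hm (hmatch.mp hc))]
      rw [hstep, ih (out ++ [(p.1, p.2, n + 1)]) k' hk2 ?_ htail]
      · rw [List.map_cons, if_neg hm]; simp
      · intro t ht htk q hq
        exact pvLt_trans (hall t ht htk) (hhead q hq)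

-- the pair stream, in the order both programs emit it
def pvPairsList (n : Int) : List (Int × Int) :=
  (PySem.List.pyRange 1 n 1).flatMap (fun i =>
    (PySem.List.pyRange (i + 1) (n + 1) 1).map (fun j => (i, j)))

theorem pvPairsList_pairwise (n : Int) : (pvPairsList n).Pairwise pvLt := by
  unfold pvPairsList
  rw [List.pairwise_flatMap]
  constructor
  · intro i _
    rw [List.pairwise_map]
    rw [List.pairwise_iff_getElem]
    intro a b ha hb hab
    rw [PySem.List.length_pyRange_one] at ha hb
    rw [PySem.List.getElem_pyRange_one, PySem.List.getElem_pyRange_one]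
    unfold pvLt
    omega
  · rw [List.pairwise_iff_getElem]
    intro a b ha hb hab x hx y hy
    rw [PySem.List.length_pyRange_one] at ha hb
    rw [PySem.List.getElem_pyRange_one] at hx hy
    obtain ⟨jx, hjx, rfl⟩ := List.mem_map.mp hx
    obtain ⟨jy, hjy, rfl⟩ := List.mem_map.mp hy
    unfold pvLt
    left
    omega

theorem pvPairsList_mem (n : Int) (p : Int × Int) (h : p ∈ pvPairsList n) :
    1 ≤ p.1 ∧ p.1 < p.2 ∧ p.2 ≤ n := by
  unfold pvPairsList at h
  obtain ⟨i, hi, hp⟩ := List.mem_flatMap.mp h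
  obtain ⟨j, hj, rfl⟩ := List.mem_map.mp hp
  have hi' := PySem.List.mem_pyRange_one.mp hi
  have hj' := PySem.List.mem_pyRange_one.mp hj
  exact ⟨by omega, by omega, by omega⟩

-- A's double fold as a map over the pair stream
theorem hamiltonian_to_tsp_eq (n : Int) (edges : List (Int × Int)) :
    hamiltonian_to_tsp n edges =
      (pvPairsList n).map (fun p =>
        (p.1, p.2, if p ∈ edges ∨ (p.2, p.1) ∈ edges then (1 : Int) else n + 1)) := by
  unfold hamiltonian_to_tsp
  rw [PySem.List.foldl_congr_mem (PySem.List.pyRange 1 n 1) _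
      (fun acc i => acc ++ (PySem.List.pyRange (i + 1) (n + 1) 1).map (fun j =>
        (i, j, if (i, j) ∈ edges ∨ (j, i) ∈ edges then (1 : Int) else n + 1))) []
      (fun acc i _ => PySem.List.foldl_append_singleton_eq_map _ _ _)]
  rw [PySem.List.foldl_append_eq_flatMap]
  unfold pvPairsList
  rw [List.map_flatMap]
  simp [List.map_map, Function.comp_def]

-- B's double fold as the merge fold over the pair stream
theorem hamiltonian_to_tsp_alt_eq (n : Int) (edges : List (Int × Int)) :
    hamiltonian_to_tsp_alt n edges =
      ((pvPairsList n).foldl (pvStep n (pvMarks n edges)) ([], 0)).1 := by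
  unfold hamiltonian_to_tsp_alt pvPairsList
  rw [List.foldl_flatMap]
  simp only [List.foldl_map]
  rfl

-- ===== VERDICT (by name: the statement is the Claim_ definition above) =====
theorem hamiltonian_to_tsp_spec : Claim_equal_hamiltonian_to_tsp := by
  intro n edges _
  unfold Spec_hamiltonian_to_tsp
  rw [hamiltonian_to_tsp_eq, hamiltonian_to_tsp_alt_eq]
  rw [pvMerge_go n (pvMarks n edges) (pvMarks_pairwise n edges) (pvPairsList n) [] 0
      (Nat.zero_le _) (fun t ht h => absurd h (by omega)) (pvPairsList_pairwise n)]
  rw [List.nil_append]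
  apply List.map_congr_left
  intro p hp
  have hr := pvPairsList_mem n p hp
  have hiff : (p ∈ pvMarks n edges) ↔ (p ∈ edges ∨ (p.2, p.1) ∈ edges) := by
    rw [pvMarks_mem]
    constructor
    · rintro ⟨_, _, _, h⟩; exact h
    · intro h; exact ⟨hr.1, hr.2.1, hr.2.2, h⟩
  simp only [hiff]
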